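-- pv_equiv track=rewrite | github.com/MahmoudG-Kotp/CarAutomation | Raspberry Pi 4/colors.py | convertHSVToColorName
-- ===== SOURCE A (Python) =====
-- def convertHSVToColorName(hsv):
--     for h, s, v in hsv:
--         if v == 0:
--             return 'Black'
--         elif s == 0:
--             if 0 < v < 50:
--                 return 'Gray'
--             elif 50 <= v < 75:
--                 return 'Silver'
--             elif 75 <= v < 100:
--                 return 'White'
--         elif s > 0:
--             if 0 < h < 20:
--                 return 'Red'
--             elif 20 <= h < 45:
--                 return 'Orange'
--             elif 45 <= h < 65:
--                 return 'Yellow'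
--             elif 65 <= h < 110:
--                 return 'Lime'
--             elif 110 <= h < 150:
--                 return 'Green'
--             elif 150 <= h < 200:
--                 return 'Cyan'
--             elif 200 <= h < 250:
--                 return 'Blue'
--             elif 250 <= h < 300:
--                 return 'Purple'
--             elif 300 <= h < 340:
--                 return 'Pink'
--             elif 340 <= h < 360:
--                 return 'Marron'
--         else:
--             return 'Unknown'
-- ===== SOURCE B (Python) =====
-- # Table-driven classifier: binary search over sorted cutoffs instead of an elif chain.
--
-- _HUE_CUTS = [20, 45, 65, 110, 150, 200, 250, 300, 340]
-- _HUE_NAMES = ['Red', 'Orange', 'Yellow', 'Lime', 'Green',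
--               'Cyan', 'Blue', 'Purple', 'Pink', 'Marron']
-- _VAL_CUTS = [50, 75]
-- _VAL_NAMES = ['Gray', 'Silver', 'White']
--
--
-- def _bisect(cuts, x, lo, hi):
--     """Index of the first cut > x within cuts[lo:hi] (recursive bisect_right)."""
--     if lo >= hi:
--         return lo
--     mid = (lo + hi) // 2
--     if x < cuts[mid]:
--         return _bisect(cuts, x, lo, mid)
--     return _bisect(cuts, x, mid + 1, hi)
--
--
-- def _classify(h, s, v):
--     if v == 0:
--         return 'Black'
--     if s == 0:
--         if 0 < v < 100:
--             return _VAL_NAMES[_bisect(_VAL_CUTS, v, 0, len(_VAL_CUTS))]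
--         return None
--     if s > 0:
--         if 0 < h < 360:
--             return _HUE_NAMES[_bisect(_HUE_CUTS, h, 0, len(_HUE_CUTS))]
--         return None
--     return 'Unknown'
--
--
-- def convertHSVToColorName(hsv):
--     for h, s, v in hsv:
--         c = _classify(h, s, v)
--         if c is not None:
--             return c
--     return None
-- ===== Notes on version B (the rewrite author's own statement) =====
-- stated objective: alternative
-- what changed: Replaces the flat 15-branch elif chain with a per-tuple classifier that looks up the color name in parallel cutoff/name tables via a recursive binary search (bisect_right) over the sorted hue and value boundaries.
import Mathlib
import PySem

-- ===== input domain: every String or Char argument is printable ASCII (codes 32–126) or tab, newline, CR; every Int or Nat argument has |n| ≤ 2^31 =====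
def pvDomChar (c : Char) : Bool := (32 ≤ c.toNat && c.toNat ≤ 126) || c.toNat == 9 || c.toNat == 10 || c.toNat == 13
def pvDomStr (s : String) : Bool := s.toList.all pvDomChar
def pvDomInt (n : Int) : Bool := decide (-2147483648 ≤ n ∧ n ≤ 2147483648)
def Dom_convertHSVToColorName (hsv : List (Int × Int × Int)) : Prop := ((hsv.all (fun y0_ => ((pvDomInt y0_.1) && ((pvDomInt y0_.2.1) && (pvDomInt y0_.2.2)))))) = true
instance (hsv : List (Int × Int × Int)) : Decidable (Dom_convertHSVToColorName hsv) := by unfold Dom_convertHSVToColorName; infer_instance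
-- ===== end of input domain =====

-- B replaces A's flat elif chain by cutoff tables with a recursive binary search (objective: alternative/data-structure).

-- ===== PORT A =====
def convertHSVToColorName : List (Int × Int × Int) → Option String
  | [] => none
  | (h, s, v) :: rest =>
    if v = 0 then some "Black"
    else if s = 0 then
      if 0 < v ∧ v < 50 then some "Gray"
      else if 50 ≤ v ∧ v < 75 then some "Silver"
      else if 75 ≤ v ∧ v < 100 then some "White"
      else convertHSVToColorName rest
    else if s > 0 then
      if 0 < h ∧ h < 20 then some "Red"
      else if 20 ≤ h ∧ h < 45 then some "Orange"
      else if 45 ≤ h ∧ h < 65 then some "Yellow"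
      else if 65 ≤ h ∧ h < 110 then some "Lime"
      else if 110 ≤ h ∧ h < 150 then some "Green"
      else if 150 ≤ h ∧ h < 200 then some "Cyan"
      else if 200 ≤ h ∧ h < 250 then some "Blue"
      else if 250 ≤ h ∧ h < 300 then some "Purple"
      else if 300 ≤ h ∧ h < 340 then some "Pink"
      else if 340 ≤ h ∧ h < 360 then some "Marron"
      else convertHSVToColorName rest
    else some "Unknown"

-- ===== PORT B =====
def pvHueCuts : List Int := [20, 45, 65, 110, 150, 200, 250, 300, 340]
def pvHueNames : List String := ["Red", "Orange", "Yellow", "Lime", "Green", "Cyan", "Blue", "Purple", "Pink", "Marron"]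
def pvValCuts : List Int := [50, 75]
def pvValNames : List String := ["Gray", "Silver", "White"]

-- recursive bisect_right of Source B; indices stay in range, so cuts[mid] is getD (never out of range here).
-- The extra fuel argument (always hi - lo, the exact recursion depth bound) only makes the same
-- computation structurally terminating; it never changes the result.
def pvBisectAux (cuts : List Int) (x : Int) (lo hi fuel : Nat) : Nat :=
  match fuel with
  | 0 => lo
  | fuel' + 1 =>
    if lo ≥ hi then lo
    else
      let mid := (lo + hi) / 2
      if x < cuts.getD mid 0 then pvBisectAux cuts x lo mid fuel'
      else pvBisectAux cuts x (mid + 1) hi fuel'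

def pvBisect (cuts : List Int) (x : Int) (lo hi : Nat) : Nat :=
  pvBisectAux cuts x lo hi (hi - lo)

-- the table index is always in range, so NAMES[i] is getD (never the default)
def pvClassify (h s v : Int) : Option String :=
  if v = 0 then some "Black"
  else if s = 0 then
    if 0 < v ∧ v < 100 then some (pvValNames.getD (pvBisect pvValCuts v 0 pvValCuts.length) "")
    else none
  else if s > 0 then
    if 0 < h ∧ h < 360 then some (pvHueNames.getD (pvBisect pvHueCuts h 0 pvHueCuts.length) "")
    else none
  else some "Unknown"

def convertHSVToColorName_alt : List (Int × Int × Int) → Option String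
  | [] => none
  | (h, s, v) :: rest =>
    match pvClassify h s v with
    | some c => some c
    | none => convertHSVToColorName_alt rest

-- ===== PRECONDITION & SPEC =====
def Spec_convertHSVToColorName (hsv : List (Int × Int × Int)) (out : Option String) : Prop := out = convertHSVToColorName_alt hsv
instance (hsv : List (Int × Int × Int)) (out : Option String) : Decidable (Spec_convertHSVToColorName hsv out) := by unfold Spec_convertHSVToColorName; infer_instance

-- ===== CLAIM (what is proved, stated in full; the proofs are below) =====
def Claim_equal_convertHSVToColorName : Prop := ∀ (hsv : List (Int × Int × Int)), Dom_convertHSVToColorName hsv → Spec_convertHSVToColorName hsv (convertHSVToColorName hsv)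

-- ===== LEMMAS AND PROOFS =====
lemma pvBisect_val (x : Int) :
    pvBisect pvValCuts x 0 2 = if x < 75 then (if x < 50 then 0 else 1) else 2 := by
  simp [pvBisect, pvBisectAux, pvValCuts]

lemma pvBisect_hue (x : Int) :
    pvBisect pvHueCuts x 0 9 =
      if x < 150 then
        (if x < 65 then (if x < 45 then (if x < 20 then 0 else 1) else 2)
         else if x < 110 then 3 else 4)
      else
        (if x < 300 then (if x < 250 then (if x < 200 then 5 else 6) else 7)
         else if x < 340 then 8 else 9) := by
  simp [pvBisect, pvBisectAux, pvHueCuts]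

lemma val_branch (v : Int) :
    (if 0 < v ∧ v < 100 then some (pvValNames.getD (pvBisect pvValCuts v 0 pvValCuts.length) "") else none)
      = if 0 < v ∧ v < 50 then some "Gray"
        else if 50 ≤ v ∧ v < 75 then some "Silver"
        else if 75 ≤ v ∧ v < 100 then some "White"
        else (none : Option String) := by
  rw [show pvValCuts.length = 2 from rfl, pvBisect_val]
  split_ifs <;> first | rfl | (exfalso; omega)

lemma hue_branch (h : Int) :
    (if 0 < h ∧ h < 360 then some (pvHueNames.getD (pvBisect pvHueCuts h 0 pvHueCuts.length) "") else none)
      = if 0 < h ∧ h < 20 then some "Red"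
        else if 20 ≤ h ∧ h < 45 then some "Orange"
        else if 45 ≤ h ∧ h < 65 then some "Yellow"
        else if 65 ≤ h ∧ h < 110 then some "Lime"
        else if 110 ≤ h ∧ h < 150 then some "Green"
        else if 150 ≤ h ∧ h < 200 then some "Cyan"
        else if 200 ≤ h ∧ h < 250 then some "Blue"
        else if 250 ≤ h ∧ h < 300 then some "Purple"
        else if 300 ≤ h ∧ h < 340 then some "Pink"
        else if 340 ≤ h ∧ h < 360 then some "Marron"
        else (none : Option String) := by
  rw [show pvHueCuts.length = 9 from rfl, pvBisect_hue]
  by_cases hin : 0 < h ∧ h < 360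
  · rw [if_pos hin]
    by_cases b0 : h < 20
    · rw [if_pos (by omega : h < 150), if_pos (by omega : h < 65), if_pos (by omega : h < 45), if_pos (by omega : h < 20), if_pos (by omega : 0 < h ∧ h < 20)]
      rfl
    by_cases b1 : h < 45
    · rw [if_pos (by omega : h < 150), if_pos (by omega : h < 65), if_pos (by omega : h < 45), if_neg (by omega : ¬ h < 20), if_neg (by omega : ¬ (0 < h ∧ h < 20)), if_pos (by omega : 20 ≤ h ∧ h < 45)]
      rfl
    by_cases b2 : h < 65
    · rw [if_pos (by omega : h < 150), if_pos (by omega : h < 65), if_neg (by omega : ¬ h < 45), if_neg (by omega : ¬ (0 < h ∧ h < 20)), if_neg (by omega : ¬ (20 ≤ h ∧ h < 45)), if_pos (by omega : 45 ≤ h ∧ h < 65)]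
      rfl
    by_cases b3 : h < 110
    · rw [if_pos (by omega : h < 150), if_neg (by omega : ¬ h < 65), if_pos (by omega : h < 110), if_neg (by omega : ¬ (0 < h ∧ h < 20)), if_neg (by omega : ¬ (20 ≤ h ∧ h < 45)), if_neg (by omega : ¬ (45 ≤ h ∧ h < 65)), if_pos (by omega : 65 ≤ h ∧ h < 110)]
      rfl
    by_cases b4 : h < 150
    · rw [if_pos (by omega : h < 150), if_neg (by omega : ¬ h < 65), if_neg (by omega : ¬ h < 110), if_neg (by omega : ¬ (0 < h ∧ h < 20)), if_neg (by omega : ¬ (20 ≤ h ∧ h < 45)), if_neg (by omega : ¬ (45 ≤ h ∧ h < 65)), if_neg (by omega : ¬ (65 ≤ h ∧ h < 110)), if_pos (by omega : 110 ≤ h ∧ h < 150)]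
      rfl
    by_cases b5 : h < 200
    · rw [if_neg (by omega : ¬ h < 150), if_pos (by omega : h < 300), if_pos (by omega : h < 250), if_pos (by omega : h < 200), if_neg (by omega : ¬ (0 < h ∧ h < 20)), if_neg (by omega : ¬ (20 ≤ h ∧ h < 45)), if_neg (by omega : ¬ (45 ≤ h ∧ h < 65)), if_neg (by omega : ¬ (65 ≤ h ∧ h < 110)), if_neg (by omega : ¬ (110 ≤ h ∧ h < 150)), if_pos (by omega : 150 ≤ h ∧ h < 200)]
      rfl
    by_cases b6 : h < 250
    · rw [if_neg (by omega : ¬ h < 150), if_pos (by omega : h < 300), if_pos (by omega : h < 250), if_neg (by omega : ¬ h < 200), if_neg (by omega : ¬ (0 < h ∧ h < 20)), if_neg (by omega : ¬ (20 ≤ h ∧ h < 45)), if_neg (by omega : ¬ (45 ≤ h ∧ h < 65)), if_neg (by omega : ¬ (65 ≤ h ∧ h < 110)), if_neg (by omega : ¬ (110 ≤ h ∧ h < 150)), if_neg (by omega : ¬ (150 ≤ h ∧ h < 200)), if_pos (by omega : 200 ≤ h ∧ h < 250)]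
      rfl
    by_cases b7 : h < 300
    · rw [if_neg (by omega : ¬ h < 150), if_pos (by omega : h < 300), if_neg (by omega : ¬ h < 250), if_neg (by omega : ¬ (0 < h ∧ h < 20)), if_neg (by omega : ¬ (20 ≤ h ∧ h < 45)), if_neg (by omega : ¬ (45 ≤ h ∧ h < 65)), if_neg (by omega : ¬ (65 ≤ h ∧ h < 110)), if_neg (by omega : ¬ (110 ≤ h ∧ h < 150)), if_neg (by omega : ¬ (150 ≤ h ∧ h < 200)), if_neg (by omega : ¬ (200 ≤ h ∧ h < 250)), if_pos (by omega : 250 ≤ h ∧ h < 300)]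
      rfl
    by_cases b8 : h < 340
    · rw [if_neg (by omega : ¬ h < 150), if_neg (by omega : ¬ h < 300), if_pos (by omega : h < 340), if_neg (by omega : ¬ (0 < h ∧ h < 20)), if_neg (by omega : ¬ (20 ≤ h ∧ h < 45)), if_neg (by omega : ¬ (45 ≤ h ∧ h < 65)), if_neg (by omega : ¬ (65 ≤ h ∧ h < 110)), if_neg (by omega : ¬ (110 ≤ h ∧ h < 150)), if_neg (by omega : ¬ (150 ≤ h ∧ h < 200)), if_neg (by omega : ¬ (200 ≤ h ∧ h < 250)), if_neg (by omega : ¬ (250 ≤ h ∧ h < 300)), if_pos (by omega : 300 ≤ h ∧ h < 340)]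
      rfl
    rw [if_neg (by omega : ¬ h < 150), if_neg (by omega : ¬ h < 300), if_neg (by omega : ¬ h < 340), if_neg (by omega : ¬ (0 < h ∧ h < 20)), if_neg (by omega : ¬ (20 ≤ h ∧ h < 45)), if_neg (by omega : ¬ (45 ≤ h ∧ h < 65)), if_neg (by omega : ¬ (65 ≤ h ∧ h < 110)), if_neg (by omega : ¬ (110 ≤ h ∧ h < 150)), if_neg (by omega : ¬ (150 ≤ h ∧ h < 200)), if_neg (by omega : ¬ (200 ≤ h ∧ h < 250)), if_neg (by omega : ¬ (250 ≤ h ∧ h < 300)), if_neg (by omega : ¬ (300 ≤ h ∧ h < 340)), if_pos (by omega : 340 ≤ h ∧ h < 360)]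
    rfl
  · rw [if_neg hin]
    rw [if_neg (by omega : ¬ (0 < h ∧ h < 20)), if_neg (by omega : ¬ (20 ≤ h ∧ h < 45)), if_neg (by omega : ¬ (45 ≤ h ∧ h < 65)), if_neg (by omega : ¬ (65 ≤ h ∧ h < 110)), if_neg (by omega : ¬ (110 ≤ h ∧ h < 150)), if_neg (by omega : ¬ (150 ≤ h ∧ h < 200)), if_neg (by omega : ¬ (200 ≤ h ∧ h < 250)), if_neg (by omega : ¬ (250 ≤ h ∧ h < 300)), if_neg (by omega : ¬ (300 ≤ h ∧ h < 340)), if_neg (by omega : ¬ (340 ≤ h ∧ h < 360))]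

lemma pvClassify_eq (h s v : Int) :
    pvClassify h s v =
      (if v = 0 then some "Black"
       else if s = 0 then
         (if 0 < v ∧ v < 50 then some "Gray"
          else if 50 ≤ v ∧ v < 75 then some "Silver"
          else if 75 ≤ v ∧ v < 100 then some "White"
          else none)
       else if s > 0 then
         (if 0 < h ∧ h < 20 then some "Red"
          else if 20 ≤ h ∧ h < 45 then some "Orange"
          else if 45 ≤ h ∧ h < 65 then some "Yellow"
          else if 65 ≤ h ∧ h < 110 then some "Lime"
          else if 110 ≤ h ∧ h < 150 then some "Green"
          else if 150 ≤ h ∧ h < 200 then some "Cyan"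
          else if 200 ≤ h ∧ h < 250 then some "Blue"
          else if 250 ≤ h ∧ h < 300 then some "Purple"
          else if 300 ≤ h ∧ h < 340 then some "Pink"
          else if 340 ≤ h ∧ h < 360 then some "Marron"
          else none)
       else some "Unknown") := by
  rw [pvClassify, val_branch, hue_branch]

lemma pvStep (h s v : Int) (r : Option String) :
    (if v = 0 then some "Black"
     else if s = 0 then
       if 0 < v ∧ v < 50 then some "Gray"
       else if 50 ≤ v ∧ v < 75 then some "Silver"
       else if 75 ≤ v ∧ v < 100 then some "White"
       else r
     else if s > 0 then
       if 0 < h ∧ h < 20 then some "Red"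
       else if 20 ≤ h ∧ h < 45 then some "Orange"
       else if 45 ≤ h ∧ h < 65 then some "Yellow"
       else if 65 ≤ h ∧ h < 110 then some "Lime"
       else if 110 ≤ h ∧ h < 150 then some "Green"
       else if 150 ≤ h ∧ h < 200 then some "Cyan"
       else if 200 ≤ h ∧ h < 250 then some "Blue"
       else if 250 ≤ h ∧ h < 300 then some "Purple"
       else if 300 ≤ h ∧ h < 340 then some "Pink"
       else if 340 ≤ h ∧ h < 360 then some "Marron"
       else r
     else some "Unknown")
    = match pvClassify h s v with
      | some c => some c
      | none => r := by
  rw [pvClassify_eq]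
  by_cases hv : v = 0
  · rw [if_pos hv, if_pos hv]
  rw [if_neg hv, if_neg hv]
  by_cases hs : s = 0
  · rw [if_pos hs, if_pos hs]
    by_cases g0 : 0 < v ∧ v < 50
    · rw [if_pos g0, if_pos g0]
    rw [if_neg g0, if_neg g0]
    by_cases g1 : 50 ≤ v ∧ v < 75
    · rw [if_pos g1, if_pos g1]
    rw [if_neg g1, if_neg g1]
    by_cases g2 : 75 ≤ v ∧ v < 100
    · rw [if_pos g2, if_pos g2]
    rw [if_neg g2, if_neg g2]
  rw [if_neg hs, if_neg hs]
  by_cases hp : s > 0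
  · rw [if_pos hp, if_pos hp]
    by_cases k0 : 0 < h ∧ h < 20
    · rw [if_pos k0, if_pos k0]
    rw [if_neg k0, if_neg k0]
    by_cases k1 : 20 ≤ h ∧ h < 45
    · rw [if_pos k1, if_pos k1]
    rw [if_neg k1, if_neg k1]
    by_cases k2 : 45 ≤ h ∧ h < 65
    · rw [if_pos k2, if_pos k2]
    rw [if_neg k2, if_neg k2]
    by_cases k3 : 65 ≤ h ∧ h < 110
    · rw [if_pos k3, if_pos k3]
    rw [if_neg k3, if_neg k3]
    by_cases k4 : 110 ≤ h ∧ h < 150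
    · rw [if_pos k4, if_pos k4]
    rw [if_neg k4, if_neg k4]
    by_cases k5 : 150 ≤ h ∧ h < 200
    · rw [if_pos k5, if_pos k5]
    rw [if_neg k5, if_neg k5]
    by_cases k6 : 200 ≤ h ∧ h < 250
    · rw [if_pos k6, if_pos k6]
    rw [if_neg k6, if_neg k6]
    by_cases k7 : 250 ≤ h ∧ h < 300
    · rw [if_pos k7, if_pos k7]
    rw [if_neg k7, if_neg k7]
    by_cases k8 : 300 ≤ h ∧ h < 340
    · rw [if_pos k8, if_pos k8]
    rw [if_neg k8, if_neg k8]
    by_cases k9 : 340 ≤ h ∧ h < 360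
    · rw [if_pos k9, if_pos k9]
    rw [if_neg k9, if_neg k9]
  rw [if_neg hp, if_neg hp]

lemma convertHSVToColorName_eq (hsv : List (Int × Int × Int)) :
    convertHSVToColorName hsv = convertHSVToColorName_alt hsv := by
  induction hsv with
  | nil => rfl
  | cons p rest ih =>
    obtain ⟨h, s, v⟩ := p
    show _ = convertHSVToColorName_alt ((h, s, v) :: rest)
    rw [convertHSVToColorName, convertHSVToColorName_alt, ih]
    exact pvStep h s v (convertHSVToColorName_alt rest)

-- ===== VERDICT (by name: the statement is the Claim_ definition above) =====
theorem convertHSVToColorName_spec : Claim_equal_convertHSVToColorName := by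
  intro hsv _
  exact convertHSVToColorName_eq hsv
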